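-- pv_equiv track=rewrite | github.com/mgrazianoc/WData | a_data_processing/Twitter/filters.py | time_construct
-- ===== SOURCE A (Python) =====
-- def time_construct(data):
--     trends = {"Data": []}
--
--     for i in range(len(data["Data"])):
--         trends["Data"].append({})
--         for j, k in data["Data"][i].items():
--             if j != "Time Query":
--                 trends["Data"][i].update({j: k})
--             else:
--                 trends["Data"][i].update({"Date Query": k[:10]})
--
--                 # adjusting time zone, with less three hours. UGLY, I know...
--                 time = k[11:19]
--                 hour = int(time[:2])
--                 hour = (hour-3) % 24
--                 if hour < 10:
--                     time = f"0{hour}" + time[2:]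
--                 else:
--                     time = f"{hour} " + time[2:]
--                 trends["Data"][i].update({"Time Query": time})
--
--     return trends
-- ===== SOURCE B (Python) =====
-- def time_construct(data):
--     def expand(pairs):
--         # recursively flatten each (key, value) pair into its replacement pairs
--         if not pairs:
--             return []
--         (j, k), rest = pairs[0], pairs[1:]
--         if j != "Time Query":
--             return [(j, k)] + expand(rest)
--         h = (int(k[11:13]) - 3) % 24
--         t = (f"0{h}" if h < 10 else f"{h} ") + k[13:19]
--         return [("Date Query", k[:10]), ("Time Query", t)] + expand(rest)
--
--     def go(recs):
--         if not recs:
--             return []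
--         return [dict(expand(list(recs[0].items())))] + go(recs[1:])
--
--     return {"Data": go(data["Data"])}
-- ===== Notes on version B (the rewrite author's own statement) =====
-- stated objective: alternative
-- what changed: B is a pure recursive decomposition: instead of A's index-driven nested loops mutating the result dict with conditional .update calls, B recursively expands each record's item list into a flat pair list (splitting the timestamp pair into date+shifted-time pairs, slicing the hour digits directly from the value) and builds each record with one dict() constructor, recursing over the record list.
import Mathlib
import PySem

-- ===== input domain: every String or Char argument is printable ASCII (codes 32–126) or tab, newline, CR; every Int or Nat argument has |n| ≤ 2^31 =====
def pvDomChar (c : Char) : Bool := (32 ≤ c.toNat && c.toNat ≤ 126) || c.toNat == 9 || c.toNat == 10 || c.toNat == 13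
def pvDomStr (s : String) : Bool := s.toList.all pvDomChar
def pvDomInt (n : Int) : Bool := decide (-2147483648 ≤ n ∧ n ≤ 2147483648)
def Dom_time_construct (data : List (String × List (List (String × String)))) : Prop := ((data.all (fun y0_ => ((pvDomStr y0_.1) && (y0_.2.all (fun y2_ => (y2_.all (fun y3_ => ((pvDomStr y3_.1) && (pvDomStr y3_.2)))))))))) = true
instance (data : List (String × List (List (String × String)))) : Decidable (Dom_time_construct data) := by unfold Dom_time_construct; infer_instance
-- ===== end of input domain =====

-- B is a recursive decomposition: it flattens each record's items into replacement pairs by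
-- structural recursion and builds each record with one dict() constructor, instead of A's
-- index-driven loops mutating the result with conditional updates.

-- ===== PORT A =====
-- A-side helper: the adjusted time string exactly as A computes it
def tcNewTime (k : String) : String :=
  let time := PySem.Str.slice k (some 11) (some 19)
  let hour := (PySem.Int.ofStr? (PySem.Str.slice time none (some 2))).getD 0
  let hour := PySem.Int.mod (hour - 3) 24
  (if hour < 10 then "0" ++ PySem.Int.toStr hour else PySem.Int.toStr hour ++ " ")
    ++ PySem.Str.slice time (some 2) none

-- A-side helper: the body of A's inner items() loop (one dict.update step per key)
def tcUpdateItem (dd : PySem.Dict String String) (jk : String × String) : PySem.Dict String String :=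
  if jk.1 ≠ "Time Query" then dd.insert jk.1 jk.2
  else (dd.insert "Date Query" (PySem.Str.slice jk.2 none (some 10))).insert "Time Query" (tcNewTime jk.2)

-- 'trends["Data"].append({})' followed by in-place updates of trends["Data"][i] is ported as
-- appending the dict obtained by folding the updates from the empty dict (i is the last index).
def time_construct (data : List (String × List (List (String × String)))) : List (String × List (List (String × String))) :=
  let recs := ((PySem.Dict.ofList data).get? "Data").getD []
  let out := (PySem.List.pyRange 0 (PySem.List.len recs) 1).foldl
      (fun (acc : List (PySem.Dict String String)) i =>
        acc ++ [((PySem.Dict.ofList (PySem.List.pyGetD recs i [])).items).foldl tcUpdateItem PySem.Dict.empty])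
      []
  [("Data", out.map PySem.Dict.items)]

-- ===== PORT B =====
-- B-side helper: recursive expansion of the item list into replacement pairs
def tcExpand : List (String × String) → List (String × String)
  | [] => []
  | (j, k) :: rest =>
    if j ≠ "Time Query" then [(j, k)] ++ tcExpand rest
    else
      let h := PySem.Int.mod ((PySem.Int.ofStr? (PySem.Str.slice k (some 11) (some 13))).getD 0 - 3) 24
      let t := (if h < 10 then "0" ++ PySem.Int.toStr h else PySem.Int.toStr h ++ " ")
                 ++ PySem.Str.slice k (some 13) (some 19)
      [("Date Query", PySem.Str.slice k none (some 10)), ("Time Query", t)] ++ tcExpand rest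

-- B-side helper: recursion over the record list, one dict() per record
def tcGo : List (List (String × String)) → List (List (String × String))
  | [] => []
  | r :: rest => [(PySem.Dict.ofList (tcExpand (PySem.Dict.ofList r).items)).items] ++ tcGo rest

def time_construct_alt (data : List (String × List (List (String × String)))) : List (String × List (List (String × String))) :=
  [("Data", tcGo (((PySem.Dict.ofList data).get? "Data").getD []))]

-- ===== PRECONDITION & SPEC =====
-- Pre_ = exactly the inputs on which the Python A returns: the dict has a "Data" key (else
-- KeyError) and every record's "Time Query" value parses as int at chars 11..12 (else ValueError).
def Pre_time_construct (data : List (String × List (List (String × String)))) : Prop :=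
  ((PySem.Dict.ofList data).contains "Data" = true) ∧
  ∀ r ∈ ((PySem.Dict.ofList data).get? "Data").getD [],
    (((PySem.Dict.ofList r).get? "Time Query").all (fun v =>
      (PySem.Int.ofStr? (PySem.Str.slice (PySem.Str.slice v (some 11) (some 19)) none (some 2))).isSome)) = true
instance (data : List (String × List (List (String × String)))) : Decidable (Pre_time_construct data) := by unfold Pre_time_construct; infer_instance

def pvWitness_time_construct : (List (String × List (List (String × String)))) :=
  [("Data", [[("Topic", "rain"), ("Time Query", "2020-01-02T15:04:05")], [("a", "b")]])]

def Spec_time_construct (data : List (String × List (List (String × String)))) (out : List (String × List (List (String × String)))) : Prop := out = time_construct_alt data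
instance (data : List (String × List (List (String × String)))) (out : List (String × List (List (String × String)))) : Decidable (Spec_time_construct data out) := by unfold Spec_time_construct; infer_instance

-- ===== CLAIM (what is proved, stated in full; the proofs are below) =====
def Claim_equal_time_construct : Prop := ∀ (data : List (String × List (List (String × String)))), Dom_time_construct data → Pre_time_construct data → Spec_time_construct data (time_construct data)

-- ===== LEMMAS AND PROOFS =====

-- slice composition: (k[11:19])[:2] = k[11:13] and (k[11:19])[2:] = k[13:19]
theorem lslice_take (l : List Char) :
    PySem.List.slice (PySem.List.slice l (some 11) (some 19)) none (some 2)
      = PySem.List.slice l (some 11) (some 13) := by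
  rw [PySem.List.slice_toNat, PySem.List.slice_toNat, PySem.List.slice_to]
  · rw [List.take_take]; congr 1
  all_goals norm_num

theorem lslice_drop (l : List Char) :
    PySem.List.slice (PySem.List.slice l (some 11) (some 19)) (some 2) none
      = PySem.List.slice l (some 13) (some 19) := by
  rw [PySem.List.slice_toNat, PySem.List.slice_toNat, PySem.List.slice_from]
  · rw [List.drop_take, List.drop_drop]; congr 1
  all_goals norm_num

theorem slice_inner_take (k : String) :
    PySem.Str.slice (PySem.Str.slice k (some 11) (some 19)) none (some 2)
      = PySem.Str.slice k (some 11) (some 13) := by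
  apply String.toList_inj.mp
  simp only [PySem.Str.toList_slice, PySem.Chars.slice_eq_listSlice]
  exact lslice_take k.toList

theorem slice_inner_drop (k : String) :
    PySem.Str.slice (PySem.Str.slice k (some 11) (some 19)) (some 2) none
      = PySem.Str.slice k (some 13) (some 19) := by
  apply String.toList_inj.mp
  simp only [PySem.Str.toList_slice, PySem.Chars.slice_eq_listSlice]
  exact lslice_drop k.toList

-- what one tcUpdateItem step contributes, as a list of pairs (A's shape)
def tqExpand (jk : String × String) : List (String × String) :=
  if jk.1 ≠ "Time Query" then [jk]
  else [("Date Query", PySem.Str.slice jk.2 none (some 10)), ("Time Query", tcNewTime jk.2)]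

theorem tcExpand_eq_flatMap (its : List (String × String)) :
    tcExpand its = its.flatMap tqExpand := by
  induction its with
  | nil => rfl
  | cons x xs ih =>
      obtain ⟨j, k⟩ := x
      by_cases h : j = "Time Query"
      · simp only [tcExpand, List.flatMap_cons, tqExpand, h, ih, ne_eq, not_true_eq_false,
          List.cons_append, List.nil_append]
        rw [← slice_inner_take, ← slice_inner_drop]
        rfl
      · simp [tcExpand, tqExpand, h, ih]

theorem foldl_tcUpdateItem (its : List (String × String)) (d : PySem.Dict String String) :
    its.foldl tcUpdateItem d = d.update (its.flatMap tqExpand) := by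
  induction its generalizing d with
  | nil => simp [PySem.Dict.update]
  | cons x xs ih =>
      simp only [List.foldl_cons, List.flatMap_cons, ih, PySem.Dict.update, List.foldl_append]
      by_cases h : x.1 = "Time Query" <;> simp [tcUpdateItem, tqExpand, h]

theorem record_eq (r : List (String × String)) :
    (((PySem.Dict.ofList r).items).foldl tcUpdateItem PySem.Dict.empty).items
      = (PySem.Dict.ofList (tcExpand (PySem.Dict.ofList r).items)).items := by
  rw [foldl_tcUpdateItem, tcExpand_eq_flatMap]
  rfl

theorem tcGo_eq_map (l : List (List (String × String))) :
    tcGo l = l.map (fun r => (PySem.Dict.ofList (tcExpand (PySem.Dict.ofList r).items)).items) := by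
  induction l with
  | nil => rfl
  | cons x xs ih => simp [tcGo, ih]

-- ===== VERDICT (by name: the statement is the Claim_ definition above) =====
theorem time_construct_spec : Claim_equal_time_construct := by
  intro data _ _
  show time_construct data = time_construct_alt data
  unfold time_construct time_construct_alt
  dsimp only []
  rw [PySem.List.foldl_pyRange_zero_pyGetD _ ([] : List (String × String))
        (fun (acc : List (PySem.Dict String String)) x =>
          acc ++ [((PySem.Dict.ofList x).items).foldl tcUpdateItem PySem.Dict.empty]) []]
  rw [PySem.List.foldl_append_singleton_eq_map]
  simp only [List.nil_append, List.map_map, tcGo_eq_map]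
  exact congrArg (fun l => [("Data", l)]) (List.map_congr_left (fun r _ => record_eq r))
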